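-- pv_equiv track=rewrite | github.com/iscumadalina/FP | src/seminar/group917/seminar_6.py | deleteStudentById
-- ===== SOURCE A (Python) =====
-- def getStudentId(student) -> str:
--     #return student[0]
--     return student["id"]
--
-- def isIdUnavailable(students: list, id: str):
--     """
--
--     :param students:
--     :param id:
--     :return: True when the id has been used
--              False otherwise
--     """
--     hasIdBeenUsed = False
--     for index in range(len(students)):
--         if getStudentId(students[index]) == id:
--             hasIdBeenUsed = True
--             break
--
--     return hasIdBeenUsed
--
-- def deleteStudentById(students: list, id: str) -> list:
--     if isIdUnavailable(students, id) == False: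
--         raise ValueError("The student with teh requested ID does not exist")
--
--     indexToBeRemoved = 0
--     for i in range(len(students)):
--         if getStudentId(students[i]) == id:
--             indexToBeRemoved = i
--             break
--
--     students.pop(indexToBeRemoved)
--
--     return students
-- ===== SOURCE B (Python) =====
-- def deleteStudentById(students: list, id: str) -> list:
--     # Single forward pass: rebuild the list without the first matching student,
--     # then splice the result back into the same list object (same in-place
--     # mutation and returned identity as the original).
--     kept = []
--     it = iter(students)
--     for student in it:
--         if student["id"] == id:
--             kept.extend(it)
--             students[:] = kept
--             return students
--         kept.append(student)
--     raise ValueError("The student with teh requested ID does not exist")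
-- ===== Notes on version B (the rewrite author's own statement) =====
-- stated objective: simpler
-- what changed: Replaces the existence-check helper, the separate index-finding loop and the index-based pop by one forward pass that rebuilds the list without the first matching student and splices it back in place.
import Mathlib
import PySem

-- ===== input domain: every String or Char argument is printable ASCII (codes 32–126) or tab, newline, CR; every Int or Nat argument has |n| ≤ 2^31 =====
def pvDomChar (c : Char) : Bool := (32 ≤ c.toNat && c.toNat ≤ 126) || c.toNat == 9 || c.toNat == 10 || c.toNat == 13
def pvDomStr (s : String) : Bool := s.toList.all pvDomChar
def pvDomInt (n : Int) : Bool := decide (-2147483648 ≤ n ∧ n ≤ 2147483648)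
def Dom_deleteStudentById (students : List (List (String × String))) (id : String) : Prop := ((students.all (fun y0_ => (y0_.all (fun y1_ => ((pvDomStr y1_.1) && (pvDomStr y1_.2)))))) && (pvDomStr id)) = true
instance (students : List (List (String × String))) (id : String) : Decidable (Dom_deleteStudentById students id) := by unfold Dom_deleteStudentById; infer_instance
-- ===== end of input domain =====

-- B replaces A's existence-check helper + index-finding loop + pop by one forward pass that
-- rebuilds the list without the first matching student (objective: simpler). Both A and B
-- mutate the argument list in place in Python; the equivalence proved here is about the
-- return value (the resulting contents are identical as well).


-- ===== PORT A =====
-- student["id"]: first-match association-list lookup (dict → assoc list convention); none = KeyError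
def pvGetStudentIdA (student : List (String × String)) : Option String :=
  (student.find? (fun kv => kv.1 == "id")).map (·.2)

-- the 'for index in range(len(students)): if … break' loop of isIdUnavailable
def pvIsIdLoopA (students : List (List (String × String))) (id : String) : Bool :=
  match students with
  | [] => false
  | s :: t => if pvGetStudentIdA s = some id then true else pvIsIdLoopA t id

-- the 'indexToBeRemoved = 0; for i in range(len(students)): if … indexToBeRemoved = i; break' loop
def pvFindIdxLoopA (students : List (List (String × String))) (id : String) (i : Nat) : Nat :=
  match students with
  | [] => 0
  | s :: t => if pvGetStudentIdA s = some id then i else pvFindIdxLoopA t id (i + 1)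

def deleteStudentById (students : List (List (String × String))) (id : String) : List (List (String × String)) :=
  if pvIsIdLoopA students id = false then students  -- Python raises ValueError here (excluded by Pre_)
  else
    match PySem.List.pop? students ((pvFindIdxLoopA students id 0 : Nat) : Int) with
    | some r => r.2
    | none => students  -- unreachable: the found index is in range

-- ===== PORT B =====
-- student["id"] in B's loop
def pvGetStudentIdB (student : List (String × String)) : Option String :=
  (student.find? (fun kv => kv.1 == "id")).map (·.2)

-- B's single pass: kept grows until the first match, then kept ++ rest of the iterator
def pvDelGoB (kept rest : List (List (String × String))) (id : String) : List (List (String × String)) :=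
  match rest with
  | [] => kept  -- Python raises ValueError here (excluded by Pre_)
  | s :: t => if pvGetStudentIdB s = some id then kept ++ t else pvDelGoB (kept ++ [s]) t id

def deleteStudentById_alt (students : List (List (String × String))) (id : String) : List (List (String × String)) :=
  pvDelGoB [] students id

-- ===== PRECONDITION & SPEC =====
-- lookup used only by Pre_ (independent of both ports)
def pvLookupId (student : List (String × String)) : Option String :=
  (student.find? (fun kv => kv.1 == "id")).map (·.2)

-- Pre_ is exactly where the Python A returns: some student maps "id" to id (else ValueError),
-- and every student strictly before the first match has an "id" key (else KeyError during the scan).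
def Pre_deleteStudentById (students : List (List (String × String))) (id : String) : Prop :=
  (∃ s ∈ students, pvLookupId s = some id) ∧
    (∀ s ∈ students.takeWhile (fun s => !(decide (pvLookupId s = some id))), (pvLookupId s).isSome)
instance (students : List (List (String × String))) (id : String) : Decidable (Pre_deleteStudentById students id) := by unfold Pre_deleteStudentById; infer_instance

def pvWitness_deleteStudentById : (List (List (String × String))) × String :=
  ([[("id", "1"), ("name", "ana")], [("id", "7"), ("name", "bob")]], "7")

def Spec_deleteStudentById (students : List (List (String × String))) (id : String) (out : List (List (String × String))) : Prop := out = deleteStudentById_alt students id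
instance (students : List (List (String × String))) (id : String) (out : List (List (String × String))) : Decidable (Spec_deleteStudentById students id out) := by unfold Spec_deleteStudentById; infer_instance

-- ===== CLAIM (what is proved, stated in full; the proofs are below) =====
def Claim_equal_deleteStudentById : Prop := ∀ (students : List (List (String × String))) (id : String), Dom_deleteStudentById students id → Pre_deleteStudentById students id → Spec_deleteStudentById students id (deleteStudentById students id)

-- ===== LEMMAS AND PROOFS =====

theorem pvWitness_ok : Dom_deleteStudentById pvWitness_deleteStudentById.1 pvWitness_deleteStudentById.2 ∧ Pre_deleteStudentById pvWitness_deleteStudentById.1 pvWitness_deleteStudentById.2 := by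
  decide

-- the B-side lookup is the A-side lookup (same Python expression student["id"])
theorem getId_BA (s : List (String × String)) : pvGetStudentIdB s = pvGetStudentIdA s := rfl
theorem lookup_A (s : List (String × String)) : pvLookupId s = pvGetStudentIdA s := rfl

theorem isIdLoop_of_mem (l : List (List (String × String))) (id : String)
    (h : ∃ s ∈ l, pvGetStudentIdA s = some id) : pvIsIdLoopA l id = true := by
  induction l with
  | nil => rcases h with ⟨_, hm, _⟩; cases hm
  | cons s t ih =>
      by_cases hs : pvGetStudentIdA s = some id
      · simp [pvIsIdLoopA, hs]
      · rcases h with ⟨x, hx, hpx⟩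
        rcases List.mem_cons.mp hx with rfl | hxt
        · exact absurd hpx hs
        · simp [pvIsIdLoopA, hs, ih ⟨x, hxt, hpx⟩]

theorem findIdx_succ (l : List (List (String × String))) (id : String)
    (h : ∃ s ∈ l, pvGetStudentIdA s = some id) (i : Nat) :
    pvFindIdxLoopA l id (i + 1) = pvFindIdxLoopA l id i + 1 := by
  induction l generalizing i with
  | nil => rcases h with ⟨_, hm, _⟩; cases hm
  | cons s t ih =>
      by_cases hs : pvGetStudentIdA s = some id
      · simp [pvFindIdxLoopA, hs]
      · rcases h with ⟨x, hx, hpx⟩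
        rcases List.mem_cons.mp hx with rfl | hxt
        · exact absurd hpx hs
        · simp [pvFindIdxLoopA, hs, ih ⟨x, hxt, hpx⟩]

theorem findIdx_lt (l : List (List (String × String))) (id : String)
    (h : ∃ s ∈ l, pvGetStudentIdA s = some id) :
    pvFindIdxLoopA l id 0 < l.length := by
  induction l with
  | nil => rcases h with ⟨_, hm, _⟩; cases hm
  | cons s t ih =>
      by_cases hs : pvGetStudentIdA s = some id
      · simp [pvFindIdxLoopA, hs]
      · rcases h with ⟨x, hx, hpx⟩
        rcases List.mem_cons.mp hx with rfl | hxt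
        · exact absurd hpx hs
        · have ht : ∃ s ∈ t, pvGetStudentIdA s = some id := ⟨x, hxt, hpx⟩
          have hih := ih ht
          simp only [pvFindIdxLoopA, if_neg hs, findIdx_succ t id ht 0, List.length_cons]
          omega

theorem delGo_acc (l : List (List (String × String))) (id : String) (acc : List (List (String × String))) :
    pvDelGoB acc l id = acc ++ pvDelGoB [] l id := by
  induction l generalizing acc with
  | nil => simp [pvDelGoB]
  | cons s t ih =>
      by_cases hs : pvGetStudentIdB s = some id
      · simp [pvDelGoB, hs]
      · simp only [pvDelGoB, if_neg hs]
        rw [ih (acc ++ [s]), ih ([] ++ [s])]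
        simp

theorem main_eq (l : List (List (String × String))) (id : String)
    (h : ∃ s ∈ l, pvGetStudentIdA s = some id) :
    deleteStudentById l id = deleteStudentById_alt l id := by
  induction l with
  | nil => rcases h with ⟨_, hm, _⟩; cases hm
  | cons s t ih =>
      have hloop := isIdLoop_of_mem _ _ h
      by_cases hs : pvGetStudentIdA s = some id
      · have hf : pvFindIdxLoopA (s :: t) id 0 = 0 := by simp [pvFindIdxLoopA, hs]
        simp [deleteStudentById, deleteStudentById_alt, pvDelGoB, hloop, hf,
          PySem.List.pop?_zero_cons, getId_BA, hs]
      · rcases h with ⟨x, hx, hpx⟩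
        rcases List.mem_cons.mp hx with rfl | hxt
        · exact absurd hpx hs
        have ht : ∃ s ∈ t, pvGetStudentIdA s = some id := ⟨x, hxt, hpx⟩
        have hltT := findIdx_lt t id ht
        have hloopT := isIdLoop_of_mem t id ht
        -- index in the cons case is (index in t) + 1
        have hidx : pvFindIdxLoopA (s :: t) id 0 = pvFindIdxLoopA t id 0 + 1 := by
          simp only [pvFindIdxLoopA, if_neg hs]
          exact findIdx_succ t id ht 0
        set k := pvFindIdxLoopA t id 0 with hk
        have hlt : k + 1 < (s :: t).length := by simp; omega
        have hpopT := PySem.List.pop?_natCast t k hltT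
        have hpopC : PySem.List.pop? (s :: t) ((k : Int) + 1) = some ((s :: t)[k + 1], s :: t.eraseIdx k) := by
          have h := PySem.List.pop?_natCast (s :: t) (k + 1) hlt
          simpa [List.eraseIdx_cons_succ] using h
        have hA : deleteStudentById (s :: t) id = s :: t.eraseIdx k := by
          simp [deleteStudentById, hloop, hidx, hpopC]
        have hAt : deleteStudentById t id = t.eraseIdx k := by
          simp [deleteStudentById, hloopT, ← hk, hpopT]
        have hB : deleteStudentById_alt (s :: t) id = s :: deleteStudentById_alt t id := by
          simp only [deleteStudentById_alt, pvDelGoB, getId_BA, if_neg hs]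
          rw [delGo_acc t id ([] ++ [s])]
          simp
        rw [hA, hB, ← ih ht, hAt]

-- ===== VERDICT (by name: the statement is the Claim_ definition above) =====
theorem deleteStudentById_spec : Claim_equal_deleteStudentById := by
  intro students id _ hpre
  unfold Spec_deleteStudentById
  rcases hpre with ⟨hex, _⟩
  exact main_eq students id (by simpa [lookup_A] using hex)
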